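-- pv_equiv track=rewrite | github.com/chuksoo/CodeMasters | TIP101 - Intro to Technical Interview Prep/Unit 3 practice.py | swap_ends
-- ===== SOURCE A (Python) =====
-- def swap_ends(my_str):
--   start = my_str[0]
--   end = my_str[-1]
--   new_string = ""
--   for i in my_str:
--     if i == start:
--       new_string += end
--     elif i == end:
--       new_string += start
--     else:
--       new_string += i
--   return new_string
-- ===== SOURCE B (Python) =====
-- def swap_ends(my_str):
--     start = my_str[0]
--     end = my_str[-1]
--     return end.join(piece.replace(end, start) for piece in my_str.split(start))
-- ===== Notes on version B (the rewrite author's own statement) =====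
-- stated objective: faster
-- what changed: Replaces the per-character loop with three-way branching and repeated string concatenation by staged C-level string operations: split the string on its first character, replace the last character by the first inside each piece, and join the pieces with the last character.
import Mathlib
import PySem

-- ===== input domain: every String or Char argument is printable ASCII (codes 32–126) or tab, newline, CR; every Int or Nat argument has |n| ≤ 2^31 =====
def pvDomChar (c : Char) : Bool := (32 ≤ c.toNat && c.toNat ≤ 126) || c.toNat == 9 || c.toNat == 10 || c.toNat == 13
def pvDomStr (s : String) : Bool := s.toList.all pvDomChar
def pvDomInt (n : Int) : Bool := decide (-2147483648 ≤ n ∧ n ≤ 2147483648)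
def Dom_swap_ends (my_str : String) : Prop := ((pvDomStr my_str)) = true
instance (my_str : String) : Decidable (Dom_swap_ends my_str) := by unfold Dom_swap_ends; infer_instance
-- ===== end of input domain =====

-- B swaps the first/last characters by staged string operations — split on the first
-- character, replace last→first inside each piece, join with the last character —
-- instead of A's per-character loop with three-way branching (measured faster in a timing run).

-- ===== PORT A =====
def swap_ends (my_str : String) : String :=
  match PySem.Str.pyGet? my_str 0, PySem.Str.pyGet? my_str (-1) with
  | some start, some stop =>
      String.ofList (my_str.toList.foldl (fun acc i =>
        if i == start then acc ++ [stop]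
        else if i == stop then acc ++ [start]
        else acc ++ [i]) [])
  | _, _ => ""   -- unreachable under Pre_ (Python raises IndexError on the empty string)

-- ===== PORT B =====
def swap_ends_alt (my_str : String) : String :=
  match PySem.Str.pyGet? my_str 0 with
  | none => ""   -- unreachable under Pre_ (Python raises IndexError on the empty string)
  | some start =>
    match PySem.Str.pyGet? my_str (-1) with
    | none => ""   -- unreachable under Pre_
    | some stop =>
      String.ofList (PySem.Chars.join [stop]
        ((PySem.Chars.splitOn my_str.toList [start]).map
          (fun piece => PySem.Chars.replace piece [stop] [start])))

-- ===== PRECONDITION & SPEC =====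
-- Pre_ excludes exactly the empty string, on which A (my_str[0]) raises IndexError.
def Pre_swap_ends (my_str : String) : Prop := my_str ≠ ""
instance (my_str : String) : Decidable (Pre_swap_ends my_str) := by unfold Pre_swap_ends; infer_instance
def pvWitness_swap_ends : String := "ab"

def Spec_swap_ends (my_str : String) (out : String) : Prop := out = swap_ends_alt my_str
instance (my_str : String) (out : String) : Decidable (Spec_swap_ends my_str out) := by unfold Spec_swap_ends; infer_instance

-- ===== CLAIM (what is proved, stated in full; the proofs are below) =====
def Claim_equal_swap_ends : Prop := ∀ (my_str : String), Dom_swap_ends my_str → Pre_swap_ends my_str → Spec_swap_ends my_str (swap_ends my_str)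

-- ===== LEMMAS AND PROOFS =====

-- a simple structural specification of splitting on a single character
def pvSplit1 (s : Char) : List Char → List (List Char)
  | [] => [[]]
  | c :: t => if c = s then [] :: pvSplit1 s t else (pvSplit1 s t).modifyHead (c :: ·)

theorem pvSplit1_ne_nil (s : Char) (l : List Char) : pvSplit1 s l ≠ [] := by
  cases l with
  | nil => simp [pvSplit1]
  | cons c t =>
    simp only [pvSplit1]
    split_ifs
    · simp
    · cases h : pvSplit1 s t with
      | nil => exact absurd h (pvSplit1_ne_nil s t)
      | cons p ps => simp

theorem pv_splitOn_go (s : Char) (fuel : Nat) (l cur : List Char)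
    (acc : List (List Char)) (h : l.length < fuel) :
    PySem.Chars.splitOn.go [s] fuel l cur acc
      = acc.reverse ++ (pvSplit1 s l).modifyHead (cur.reverse ++ ·) := by
  induction fuel generalizing l cur acc with
  | zero => omega
  | succ fuel ih =>
    cases l with
    | nil => simp [PySem.Chars.splitOn.go, pvSplit1]
    | cons c rest =>
      rw [PySem.Chars.splitOn.go]
      by_cases hcs : c = s
      · have hp : List.isPrefixOf [s] (c :: rest) = true := by simp [List.isPrefixOf, hcs]
        rw [if_pos hp]
        simp only [List.length_cons, List.length_nil, List.drop_succ_cons, List.drop_zero]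
        rw [ih rest [] (cur.reverse :: acc) (by simpa using Nat.lt_of_succ_lt_succ h)]
        simp [pvSplit1, hcs]
        cases pvSplit1 s rest <;> simp
      · have hp : List.isPrefixOf [s] (c :: rest) = false := by
          simp [List.isPrefixOf]; exact fun hh => hcs hh.symm
        rw [if_neg (by simp [hp])]
        rw [ih rest (c :: cur) acc (by simpa using Nat.lt_of_succ_lt_succ h)]
        simp only [pvSplit1, if_neg hcs, List.reverse_cons]
        cases hsp : pvSplit1 s rest with
        | nil => exact absurd hsp (pvSplit1_ne_nil s rest)
        | cons p ps => simp

theorem pv_splitOn_eq (s : Char) (l : List Char) :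
    PySem.Chars.splitOn l [s] = pvSplit1 s l := by
  rw [PySem.Chars.splitOn, pv_splitOn_go s (l.length + 1) l [] [] (by omega)]
  cases hsp : pvSplit1 s l with
  | nil => exact absurd hsp (pvSplit1_ne_nil s l)
  | cons p ps => simp

theorem pv_replace_go (e s : Char) (fuel : Nat) (l acc : List Char)
    (h : l.length ≤ fuel) :
    PySem.Chars.replace.go [e] [s] fuel l acc
      = acc.reverse ++ l.map (fun c => if c = e then s else c) := by
  induction fuel generalizing l acc with
  | zero =>
    have : l = [] := List.eq_nil_of_length_eq_zero (Nat.le_zero.mp h)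
    subst this; simp [PySem.Chars.replace.go]
  | succ fuel ih =>
    cases l with
    | nil => simp [PySem.Chars.replace.go]
    | cons c t =>
      rw [PySem.Chars.replace.go]
      by_cases hce : c = e
      · have hp : List.isPrefixOf [e] (c :: t) = true := by simp [List.isPrefixOf, hce]
        rw [if_pos hp]
        simp only [List.length_cons, List.length_nil, List.drop_succ_cons, List.drop_zero]
        rw [ih t ([s].reverse ++ acc) (by simpa using Nat.le_of_succ_le_succ h)]
        simp [hce]
      · have hp : List.isPrefixOf [e] (c :: t) = false := by
          simp [List.isPrefixOf]; exact fun hh => hce hh.symm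
        rw [if_neg (by simp [hp])]
        rw [ih t (c :: acc) (by simpa using Nat.le_of_succ_le_succ h)]
        simp [hce]

theorem pv_replace_eq (e s : Char) (l : List Char) :
    PySem.Chars.replace l [e] [s] = l.map (fun c => if c = e then s else c) := by
  rw [PySem.Chars.replace]
  rw [if_neg (by simp)]
  simpa using pv_replace_go e s l.length l [] (le_refl _)

theorem pv_main (s e : Char) (cs : List Char) :
    PySem.Chars.join [e] ((pvSplit1 s cs).map (List.map (fun c => if c = e then s else c)))
      = cs.map (fun c => if c == s then e else if c == e then s else c) := by
  induction cs with
  | nil => simp [pvSplit1, PySem.Chars.join_singleton]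
  | cons c t ih =>
    simp only [pvSplit1]
    cases hsp : pvSplit1 s t with
    | nil => exact absurd hsp (pvSplit1_ne_nil s t)
    | cons p ps =>
      rw [hsp] at ih
      simp only [List.map_cons] at ih
      by_cases hcs : c = s
      · rw [if_pos hcs]
        simp only [List.map_cons, List.map_nil]
        rw [PySem.Chars.join_cons_cons, ih]
        simp [hcs]
      · rw [if_neg hcs]
        simp only [List.modifyHead, List.map_cons]
        have hstep : PySem.Chars.join [e]
            (((if c = e then s else c) :: List.map (fun c => if c = e then s else c) p) ::
              List.map (List.map (fun c => if c = e then s else c)) ps)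
            = (if c = e then s else c) ::
              PySem.Chars.join [e]
                (List.map (fun c => if c = e then s else c) p ::
                  List.map (List.map (fun c => if c = e then s else c)) ps) := by
          cases ps with
          | nil => simp [PySem.Chars.join_singleton]
          | cons q qs =>
            simp only [List.map_cons]
            rw [PySem.Chars.join_cons_cons, PySem.Chars.join_cons_cons]
            simp
        rw [hstep, ih]
        simp [hcs]

theorem pv_foldl_append_singleton (g : Char → Char) (l : List Char) (acc : List Char) :
    l.foldl (fun acc c => acc ++ [g c]) acc = acc ++ l.map g := by
  induction l generalizing acc with
  | nil => simp
  | cons x xs ih => simp [List.foldl, ih]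

-- ===== VERDICT (by name: the statement is the Claim_ definition above) =====
theorem swap_ends_spec : Claim_equal_swap_ends := by
  intro my_str _ _
  unfold Spec_swap_ends swap_ends swap_ends_alt
  cases h0 : PySem.Str.pyGet? my_str 0 with
  | none => cases h1 : PySem.Str.pyGet? my_str (-1) <;> simp
  | some s =>
    cases h1 : PySem.Str.pyGet? my_str (-1) with
    | none => simp
    | some e =>
      simp only []
      congr 1
      have hf : (fun (acc : List Char) i =>
          if i == s then acc ++ [e] else if i == e then acc ++ [s] else acc ++ [i])
          = fun (acc : List Char) i => acc ++ [if i == s then e else if i == e then s else i] := by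
        funext acc i; split_ifs <;> rfl
      rw [hf, pv_foldl_append_singleton, List.nil_append]
      rw [pv_splitOn_eq]
      have : (fun piece => PySem.Chars.replace piece [e] [s])
          = List.map (fun c => if c = e then s else c) := by
        funext piece; exact pv_replace_eq e s piece
      rw [this, pv_main]
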